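-- pv_equiv track=rewrite | github.com/LunaTIKTOK/claim-verify | verify.py | infer_required_data
-- ===== SOURCE A (Python) =====
-- from typing import Any, Iterable
--
-- def infer_required_data(claim: str, assumptions: list[dict[str, Any]]) -> list[str]:
--     """Infer concrete data that would most reduce assumption uncertainty."""
--     data_needed: list[str] = []
--     action_families = {str(item.get("action_family", "")) for item in assumptions}
--     low_testability = [item for item in assumptions if item.get("testability") == "low"]
--
--     if low_testability:
--         data_needed.append("Observable metric that would confirm the claimed outcome")
--     if "dominance" in action_families or "comparison" in action_families or "replacement" in action_families:
--         data_needed.append("Comparison baseline against leading alternatives")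
--     if "dependency" in action_families or "causation" in action_families:
--         data_needed.append("Constraint or dependency check that could invalidate the claim")
--     if "growth" in action_families or "optimization" in action_families or "persistence" in action_families:
--         data_needed.append("Time-series checkpoint showing whether the claimed trend persists")
--     if not data_needed:
--         data_needed.append("Pre-registered acceptance criteria for a small-scope validation run")
--         data_needed.append("Observable metric that would confirm or falsify the claimed outcome")
--
--     deduped: list[str] = []
--     seen: set[str] = set()
--     for item in data_needed:
--         key = item.lower()
--         if key in seen:
--             continue
--         seen.add(key)
--         deduped.append(item)
--     return deduped[:4] if len(deduped) >= 2 else deduped + ["Comparison baseline against alternatives"][: max(0, 2 - len(deduped))]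
-- ===== SOURCE B (Python) =====
-- _MESSAGES = [
--     "Observable metric that would confirm the claimed outcome",
--     "Comparison baseline against leading alternatives",
--     "Constraint or dependency check that could invalidate the claim",
--     "Time-series checkpoint showing whether the claimed trend persists",
-- ]
-- _FAMILY_RULE = {"dominance": 1, "comparison": 1, "replacement": 1,
--                 "dependency": 2, "causation": 2,
--                 "growth": 3, "optimization": 3, "persistence": 3}
--
--
-- def infer_required_data(claim: str, assumptions: list) -> list:
--     """Infer concrete data that would most reduce assumption uncertainty.
--
--     Single pass over `assumptions` filling a 4-flag hit vector via a
--     keyword->rule-index table, then the messages are read off a message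
--     table zipped with the flags; correct because each of A's staged scans
--     decides exactly one flag and each flag emits one fixed message in the
--     same order, A's dedup is a no-op (the messages are pairwise distinct,
--     also after lower()) and its slice/pad reduces to length reasoning.
--     """
--     hit = [False, False, False, False]
--     for item in assumptions:
--         if item.get("testability") == "low":
--             hit[0] = True
--         rule = _FAMILY_RULE.get(str(item.get("action_family", "")))
--         if rule is not None:
--             hit[rule] = True
--     needs = [msg for flag, msg in zip(hit, _MESSAGES) if flag]
--     if not needs:
--         return ["Pre-registered acceptance criteria for a small-scope validation run",
--                 "Observable metric that would confirm or falsify the claimed outcome"]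
--     if len(needs) == 1:
--         needs.append("Comparison baseline against alternatives")
--     return needs
-- ===== Notes on version B (the rewrite author's own statement) =====
-- stated objective: alternative
-- what changed: B replaces A's staged scans (precomputed action-family set, low-testability filter list, per-rule membership tests, then a case-insensitive dedup pass and a slice/pad epilogue) by a single pass over assumptions that fills a 4-flag hit vector via a keyword-to-rule-index table, then reads the output off a message table zipped with the flags.
import Mathlib
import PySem

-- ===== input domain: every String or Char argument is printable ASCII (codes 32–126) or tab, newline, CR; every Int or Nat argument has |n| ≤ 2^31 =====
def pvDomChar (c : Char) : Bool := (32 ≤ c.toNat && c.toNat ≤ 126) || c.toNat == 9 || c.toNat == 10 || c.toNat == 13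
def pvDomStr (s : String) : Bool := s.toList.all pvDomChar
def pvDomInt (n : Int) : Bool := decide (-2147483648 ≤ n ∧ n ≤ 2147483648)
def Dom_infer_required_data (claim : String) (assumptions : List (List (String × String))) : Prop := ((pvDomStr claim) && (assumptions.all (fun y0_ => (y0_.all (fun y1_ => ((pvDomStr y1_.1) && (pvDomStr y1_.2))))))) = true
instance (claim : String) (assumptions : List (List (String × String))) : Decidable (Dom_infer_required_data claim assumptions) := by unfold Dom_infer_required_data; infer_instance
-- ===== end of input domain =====

-- B replaces A's staged scans (family set, testability filter, per-rule tests, dedup, slice/pad)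
-- by a single pass filling a 4-flag hit vector via a keyword→rule-index table, then a zipped
-- message table (objective: alternative).

-- ===== PORT A =====
def infer_required_data (claim : String) (assumptions : List (List (String × String))) : List String :=
  let action_families : PySem.Set String :=
    PySem.Set.ofList (assumptions.map (fun item => PySem.Dict.getD (PySem.Dict.mk item) "action_family" ""))
  let low_testability := assumptions.filter (fun item => PySem.Dict.get? (PySem.Dict.mk item) "testability" == some "low")
  let data_needed : List String := []
  let data_needed := if !low_testability.isEmpty then
      data_needed ++ ["Observable metric that would confirm the claimed outcome"] else data_needed
  let data_needed := if action_families.contains "dominance" || action_families.contains "comparison" || action_families.contains "replacement" then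
      data_needed ++ ["Comparison baseline against leading alternatives"] else data_needed
  let data_needed := if action_families.contains "dependency" || action_families.contains "causation" then
      data_needed ++ ["Constraint or dependency check that could invalidate the claim"] else data_needed
  let data_needed := if action_families.contains "growth" || action_families.contains "optimization" || action_families.contains "persistence" then
      data_needed ++ ["Time-series checkpoint showing whether the claimed trend persists"] else data_needed
  let data_needed := if data_needed.isEmpty then
      data_needed ++ ["Pre-registered acceptance criteria for a small-scope validation run"]
                  ++ ["Observable metric that would confirm or falsify the claimed outcome"] else data_needed
  let st := data_needed.foldl (fun (st : List String × PySem.Set String) item =>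
      let key := PySem.Str.lower item
      if st.2.contains key then st else (st.1 ++ [item], st.2.add key)) ([], PySem.Set.empty)
  let deduped := st.1
  if deduped.length ≥ 2 then deduped.take 4
  else deduped ++ (["Comparison baseline against alternatives"].take (max 0 (2 - deduped.length)))

-- ===== PORT B =====
def pvMessages : List String :=
  ["Observable metric that would confirm the claimed outcome",
   "Comparison baseline against leading alternatives",
   "Constraint or dependency check that could invalidate the claim",
   "Time-series checkpoint showing whether the claimed trend persists"]

def pvFamilyRule : PySem.Dict String Nat :=
  PySem.Dict.ofList [("dominance", 1), ("comparison", 1), ("replacement", 1),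
                     ("dependency", 2), ("causation", 2),
                     ("growth", 3), ("optimization", 3), ("persistence", 3)]

def infer_required_data_alt (claim : String) (assumptions : List (List (String × String))) : List String :=
  let hit := assumptions.foldl (fun (hit : List Bool) item =>
      let hit := if PySem.Dict.get? (PySem.Dict.mk item) "testability" == some "low" then hit.set 0 true else hit
      match PySem.Dict.get? pvFamilyRule (PySem.Dict.getD (PySem.Dict.mk item) "action_family" "") with
      | none => hit
      | some rule => hit.set rule true) [false, false, false, false]
  let needs := ((hit.zip pvMessages).filter (fun fm => fm.1)).map (fun fm => fm.2)
  if needs.isEmpty then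
    ["Pre-registered acceptance criteria for a small-scope validation run",
     "Observable metric that would confirm or falsify the claimed outcome"]
  else if needs.length == 1 then needs ++ ["Comparison baseline against alternatives"]
  else needs

-- ===== PRECONDITION & SPEC =====
def Spec_infer_required_data (claim : String) (assumptions : List (List (String × String))) (out : List String) : Prop := out = infer_required_data_alt claim assumptions
instance (claim : String) (assumptions : List (List (String × String))) (out : List String) : Decidable (Spec_infer_required_data claim assumptions out) := by unfold Spec_infer_required_data; infer_instance

-- ===== CLAIM (what is proved, stated in full; the proofs are below) =====
def Claim_equal_infer_required_data : Prop := ∀ (claim : String) (assumptions : List (List (String × String))), Dom_infer_required_data claim assumptions → Spec_infer_required_data claim assumptions (infer_required_data claim assumptions)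

-- ===== LEMMAS AND PROOFS =====

-- abbreviations for the per-item tests (proof-local)
def pvLow (item : List (String × String)) : Bool :=
  PySem.Dict.get? (PySem.Dict.mk item) "testability" == some "low"
def pvFam (item : List (String × String)) : String :=
  PySem.Dict.getD (PySem.Dict.mk item) "action_family" ""

-- A's "nonempty filter" test equals an any(...) scan.
theorem pv_filter_any (p : List (String × String) → Bool) (l : List (List (String × String))) :
    (!(l.filter p).isEmpty) = l.any p := by
  rw [Bool.eq_iff_iff]; simp [List.filter_eq_nil_iff, List.any_eq_true]

-- Membership of three keywords in A's precomputed family set as one any(...) scan.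
theorem pv_fam3 (l : List (List (String × String))) (f : List (String × String) → String) (a b c : String) :
    ((PySem.Set.ofList (l.map f)).contains a || (PySem.Set.ofList (l.map f)).contains b ||
     (PySem.Set.ofList (l.map f)).contains c)
    = l.any (fun it => f it == a || f it == b || f it == c) := by
  rw [Bool.eq_iff_iff]
  simp only [Bool.or_eq_true, List.any_eq_true, PySem.Set.contains_iff, PySem.Set.mem_ofList,
    List.mem_map, beq_iff_eq]
  constructor
  · rintro ((⟨x, hx, rfl⟩ | ⟨x, hx, rfl⟩) | ⟨x, hx, rfl⟩) <;> exact ⟨x, hx, by simp⟩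
  · rintro ⟨x, hx, h⟩
    rcases h with (h | h) | h
    · exact Or.inl (Or.inl ⟨x, hx, h⟩)
    · exact Or.inl (Or.inr ⟨x, hx, h⟩)
    · exact Or.inr ⟨x, hx, h⟩

-- Same for a two-keyword group.
theorem pv_fam2 (l : List (List (String × String))) (f : List (String × String) → String) (a b : String) :
    ((PySem.Set.ofList (l.map f)).contains a || (PySem.Set.ofList (l.map f)).contains b)
    = l.any (fun it => f it == a || f it == b) := by
  rw [Bool.eq_iff_iff]
  simp only [Bool.or_eq_true, List.any_eq_true, PySem.Set.contains_iff, PySem.Set.mem_ofList,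
    List.mem_map, beq_iff_eq]
  constructor
  · rintro (⟨x, hx, rfl⟩ | ⟨x, hx, rfl⟩) <;> exact ⟨x, hx, by simp⟩
  · rintro ⟨x, hx, h⟩
    rcases h with h | h
    · exact Or.inl ⟨x, hx, h⟩
    · exact Or.inr ⟨x, hx, h⟩

-- the literal rule table as a nested if over string equalities
theorem pv_rule_eq (f : String) :
    PySem.Dict.get? pvFamilyRule f
    = (if f == "dominance" || f == "comparison" || f == "replacement" then some 1
       else if f == "dependency" || f == "causation" then some 2
       else if f == "growth" || f == "optimization" || f == "persistence" then some 3
       else none) := by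
  rcases eq_or_ne f "dominance" with rfl | h1; · decide
  rcases eq_or_ne f "comparison" with rfl | h2; · decide
  rcases eq_or_ne f "replacement" with rfl | h3; · decide
  rcases eq_or_ne f "dependency" with rfl | h4; · decide
  rcases eq_or_ne f "causation" with rfl | h5; · decide
  rcases eq_or_ne f "growth" with rfl | h6; · decide
  rcases eq_or_ne f "optimization" with rfl | h7; · decide
  rcases eq_or_ne f "persistence" with rfl | h8; · decide
  have hm : pvFamilyRule = PySem.Dict.mk [("dominance", 1), ("comparison", 1), ("replacement", 1),
      ("dependency", 2), ("causation", 2), ("growth", 3), ("optimization", 3), ("persistence", 3)] := by decide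
  rw [hm]
  simp [PySem.Dict.get?, beq_iff_eq,
    h1, h2, h3, h4, h5, h6, h7, h8, Ne.symm h1, Ne.symm h2, Ne.symm h3, Ne.symm h4,
    Ne.symm h5, Ne.symm h6, Ne.symm h7, Ne.symm h8]

-- one step of B's loop, in terms of the per-item tests
theorem pv_step (a b c d : Bool) (it : List (String × String)) :
    (let hit := if PySem.Dict.get? (PySem.Dict.mk it) "testability" == some "low" then [a, b, c, d].set 0 true else [a, b, c, d]
     match PySem.Dict.get? pvFamilyRule (PySem.Dict.getD (PySem.Dict.mk it) "action_family" "") with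
     | none => hit
     | some rule => hit.set rule true)
    = [a || pvLow it,
       b || (pvFam it == "dominance" || pvFam it == "comparison" || pvFam it == "replacement"),
       c || (pvFam it == "dependency" || pvFam it == "causation"),
       d || (pvFam it == "growth" || pvFam it == "optimization" || pvFam it == "persistence")] := by
  show (let hit := if pvLow it then [a, b, c, d].set 0 true else [a, b, c, d]
        match PySem.Dict.get? pvFamilyRule (pvFam it) with
        | none => hit
        | some rule => hit.set rule true) = _
  rw [pv_rule_eq]
  generalize pvFam it = f
  cases hL : pvLow it <;>
  cases h1 : (f == "dominance" || f == "comparison" || f == "replacement") <;>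
  cases h2 : (f == "dependency" || f == "causation") <;>
  cases h3 : (f == "growth" || f == "optimization" || f == "persistence") <;>
  simp at h1 h2 h3 <;>
  (try (rcases h1 with (rfl | rfl) | rfl)) <;>
  (try (rcases h2 with rfl | rfl)) <;>
  (try (rcases h3 with (rfl | rfl) | rfl)) <;>
  simp_all

-- B's fold computes the four any(...) flags
theorem pv_fold (l : List (List (String × String))) (a b c d : Bool) :
    l.foldl (fun (hit : List Bool) item =>
      let hit := if PySem.Dict.get? (PySem.Dict.mk item) "testability" == some "low" then hit.set 0 true else hit
      match PySem.Dict.get? pvFamilyRule (PySem.Dict.getD (PySem.Dict.mk item) "action_family" "") with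
      | none => hit
      | some rule => hit.set rule true) [a, b, c, d]
    = [a || l.any (fun it => pvLow it),
       b || l.any (fun it => pvFam it == "dominance" || pvFam it == "comparison" || pvFam it == "replacement"),
       c || l.any (fun it => pvFam it == "dependency" || pvFam it == "causation"),
       d || l.any (fun it => pvFam it == "growth" || pvFam it == "optimization" || pvFam it == "persistence")] := by
  induction l generalizing a b c d with
  | nil => simp
  | cons x xs ih =>
      rw [List.foldl_cons, pv_step, ih]
      simp [Bool.or_assoc]

-- ===== VERDICT (by name: the statement is the Claim_ definition above) =====
theorem infer_required_data_spec : Claim_equal_infer_required_data := by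
  intro claim assumptions _
  show infer_required_data claim assumptions = infer_required_data_alt claim assumptions
  unfold infer_required_data infer_required_data_alt
  dsimp only
  rw [pv_filter_any, pv_fam3, pv_fam2, pv_fam3, pv_fold]
  simp only [pvLow, pvFam]
  rcases Bool.eq_false_or_eq_true (assumptions.any (fun item => PySem.Dict.get? (PySem.Dict.mk item) "testability" == some "low")) with h0 | h0 <;>
  rcases Bool.eq_false_or_eq_true (assumptions.any (fun it => PySem.Dict.getD (PySem.Dict.mk it) "action_family" "" == "dominance" || PySem.Dict.getD (PySem.Dict.mk it) "action_family" "" == "comparison" || PySem.Dict.getD (PySem.Dict.mk it) "action_family" "" == "replacement")) with h1 | h1 <;>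
  rcases Bool.eq_false_or_eq_true (assumptions.any (fun it => PySem.Dict.getD (PySem.Dict.mk it) "action_family" "" == "dependency" || PySem.Dict.getD (PySem.Dict.mk it) "action_family" "" == "causation")) with h2 | h2 <;>
  rcases Bool.eq_false_or_eq_true (assumptions.any (fun it => PySem.Dict.getD (PySem.Dict.mk it) "action_family" "" == "growth" || PySem.Dict.getD (PySem.Dict.mk it) "action_family" "" == "optimization" || PySem.Dict.getD (PySem.Dict.mk it) "action_family" "" == "persistence")) with h3 | h3 <;>
  simp only [h0, h1, h2, h3] <;> decide
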